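-- pv_equiv track=rewrite | github.com/CyberNet-Works/progress_tracker | Python/python_competition/string_manipulation/#replace_xs_in_word.py | pronounce_xs
-- ===== SOURCE A (Python) =====
-- def pronounce_xs(s):
--     characters = list(s)
--
--     if characters[-1] == 'x':
--         characters[-1] = 'k'
--
--     for i in range(len(characters) - 1):
--         if characters[i] == 'x' and characters[i + 1] in 'aeiou':
--             characters[i] = 'cks'
--
--         if characters[i] == 'x' and characters[i + 1] not in 'aeiou':
--             characters[i] = 'k'
--
--
--     return "".join(characters)
-- ===== SOURCE B (Python) =====
-- def pronounce_xs(s):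
--     # Split on 'x'; each removed 'x' is pronounced from the head of the
--     # following segment: 'cks' before a vowel, otherwise 'k'.
--     parts = s.split('x')
--     result = parts[0]
--     for seg in parts[1:]:
--         result += ('cks' if seg[:1] in ('a', 'e', 'i', 'o', 'u') else 'k') + seg
--     return result
-- ===== Notes on version B (the rewrite author's own statement) =====
-- stated objective: alternative
-- what changed: A walks an indexed list of cells, mutating each 'x' cell in place after a separate last-cell pre-fix; B splits the string on 'x' and rejoins the segments, choosing 'cks' or 'k' for each removed 'x' from the head of the following segment.
import Mathlib
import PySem

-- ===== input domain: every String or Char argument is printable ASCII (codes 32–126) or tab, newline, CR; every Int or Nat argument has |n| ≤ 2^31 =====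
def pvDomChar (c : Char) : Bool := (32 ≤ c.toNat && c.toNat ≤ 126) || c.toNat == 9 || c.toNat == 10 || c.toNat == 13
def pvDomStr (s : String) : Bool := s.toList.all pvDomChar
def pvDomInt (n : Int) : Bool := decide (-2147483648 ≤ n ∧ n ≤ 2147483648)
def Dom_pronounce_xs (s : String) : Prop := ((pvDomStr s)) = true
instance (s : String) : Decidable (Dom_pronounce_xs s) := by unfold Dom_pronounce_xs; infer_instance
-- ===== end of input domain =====

-- B replaces A's in-place indexed cell mutation by split-on-'x' and rejoin: each removed
-- 'x' is re-pronounced from the head of the following segment ('cks' before a vowel,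
-- else 'k'); objective: alternative (a timing run measured B faster by a constant factor: C-level split/join instead of a per-character Python loop). Pre_ excludes the empty
-- string, on which A raises IndexError (B happens to return "" there; nothing is claimed).


-- ===== PORT A =====
-- literal port of A: characters = list(s) (cells are strings, a cell may become "cks"),
-- the characters[-1] test/assignment, then the indexed loop with its two sequential ifs.
-- characters[-1] raises IndexError on the empty string: excluded by Pre_pronounce_xs.
def pronounce_xs (s : String) : String :=
  let characters : List String := s.toList.map (fun c => String.ofList [c])
  let characters : List String :=
    if PySem.List.pyGetD characters (-1) "" = "x"
    then PySem.List.pySetD characters (-1) "k" else characters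
  let characters : List String :=
    (PySem.List.pyRange 0 ((characters.length : Int) - 1) 1).foldl
      (fun cs i =>
        let cs := if PySem.List.pyGetD cs i "" = "x" ∧
                     PySem.Str.isIn (PySem.List.pyGetD cs (i + 1) "") "aeiou" = true
                  then PySem.List.pySetD cs i "cks" else cs
        let cs := if PySem.List.pyGetD cs i "" = "x" ∧
                     ¬ (PySem.Str.isIn (PySem.List.pyGetD cs (i + 1) "") "aeiou" = true)
                  then PySem.List.pySetD cs i "k" else cs
        cs)
      characters
  PySem.Str.join "" characters

-- ===== PORT B =====
-- literal port of Source B: parts = s.split('x') (Chars.splitOn, wrapped back to String),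
-- result = parts[0], then the for-loop over parts[1:] appending the separator decided
-- by seg[:1] ∈ ('a','e','i','o','u') and the segment itself.
def pronounce_xs_alt (s : String) : String :=
  let parts : List String := (PySem.Chars.splitOn s.toList "x".toList).map String.ofList
  let result : String := PySem.List.pyGetD parts 0 ""
  (PySem.List.slice parts (some 1) none).foldl
    (fun r seg =>
      r ++ (if (["a", "e", "i", "o", "u"] : List String).contains (PySem.Str.slice seg none (some 1))
            then "cks" else "k") ++ seg)
    result

-- ===== PRECONDITION & SPEC =====
-- Pre_ excludes only the empty string, on which A raises IndexError via characters[-1].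
def Pre_pronounce_xs (s : String) : Prop := s.toList ≠ []
instance (s : String) : Decidable (Pre_pronounce_xs s) := by unfold Pre_pronounce_xs; infer_instance
def pvWitness_pronounce_xs : String := "xylophone"
def Spec_pronounce_xs (s : String) (out : String) : Prop := out = pronounce_xs_alt s
instance (s : String) (out : String) : Decidable (Spec_pronounce_xs s out) := by unfold Spec_pronounce_xs; infer_instance

-- ===== CLAIM (what is proved, stated in full; the proofs are below) =====
def Claim_equal_pronounce_xs : Prop := ∀ (s : String), Dom_pronounce_xs s → Pre_pronounce_xs s → Spec_pronounce_xs s (pronounce_xs s)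

-- ===== LEMMAS AND PROOFS =====

-- a cell is "a vowel" exactly when Python's  cell in 'aeiou'  is true
def vowS (t : String) : Bool := PySem.Str.isIn t "aeiou"
def vowC (c : Char) : Bool := decide (c ∈ ['a', 'e', 'i', 'o', 'u'])

-- pairwise result of A's loop on a cell list (cell i rewritten from cells i, i+1)
def procAs : List String → List String
  | [] => []
  | [c] => [c]
  | c :: d :: t =>
      (if c = "x" then (if vowS d then "cks" else "k") else c) :: procAs (d :: t)

-- A's whole cell computation (last-cell fix fused in), on the original characters
def fA : List Char → List String
  | [] => []
  | [c] => [if c = 'x' then "k" else String.ofList [c]]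
  | c :: d :: t =>
      (if c = 'x' then (if vowC d then "cks" else "k") else String.ofList [c]) :: fA (d :: t)

lemma vow_single (d : Char) : vowS (String.ofList [d]) = vowC d := by
  by_cases h : d ∈ ['a', 'e', 'i', 'o', 'u']
  · have h1 : PySem.Chars.isIn [d] ['a', 'e', 'i', 'o', 'u'] = true :=
      (PySem.Chars.isIn_iff_infix _ _).mpr ((List.singleton_infix_iff _ _).mpr h)
    simp [vowS, vowC, h, PySem.Str.isIn, h1, show ("aeiou" : String).toList = ['a','e','i','o','u'] from rfl]
  · have h1 : PySem.Chars.isIn [d] ['a', 'e', 'i', 'o', 'u'] = false :=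
      (PySem.Chars.isIn_eq_false_iff _ _).mpr (fun hin => h ((List.singleton_infix_iff _ _).mp hin))
    simp [vowS, vowC, h, PySem.Str.isIn, h1, show ("aeiou" : String).toList = ['a','e','i','o','u'] from rfl]

lemma set_last_nat {α : Type} (xs : List α) (v : α) (h : xs ≠ []) :
    xs.set (xs.length - 1) v = xs.dropLast ++ [v] := by
  rcases List.eq_nil_or_concat xs with rfl | ⟨ys, y, rfl⟩
  · exact absurd rfl h
  · simp

lemma set_last {α : Type} (xs : List α) (v : α) (h : xs ≠ []) :
    PySem.List.pySetD xs (-1) v = xs.dropLast ++ [v] := by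
  have hl : 0 < xs.length := List.length_pos_iff.mpr h
  simp only [PySem.List.pySetD, PySem.List.pySet?, PySem.List.pyIdx?]
  rw [if_neg (by omega), if_pos (by omega)]
  simp only [Option.map_some, Option.getD_some, show (-(-1 : Int)).toNat = 1 from rfl]
  exact set_last_nat xs v h

-- one step of A's loop at index done.length on done ++ (c :: d :: t)
lemma loop_step (done : List String) (c d : String) (t : List String) :
    (let cs := if PySem.List.pyGetD (done ++ c :: d :: t) ((done.length : Int)) "" = "x" ∧
                  PySem.Str.isIn (PySem.List.pyGetD (done ++ c :: d :: t)
                    ((done.length : Int) + 1) "") "aeiou" = true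
               then PySem.List.pySetD (done ++ c :: d :: t) ((done.length : Int)) "cks"
               else done ++ c :: d :: t
     let cs := if PySem.List.pyGetD cs ((done.length : Int)) "" = "x" ∧
                  ¬ PySem.Str.isIn (PySem.List.pyGetD cs ((done.length : Int) + 1) "") "aeiou" = true
               then PySem.List.pySetD cs ((done.length : Int)) "k"
               else cs
     cs) = done ++ (if c = "x" then (if vowS d then "cks" else "k") else c) :: d :: t := by
  have hget : ∀ w : String, PySem.List.pyGetD (done ++ w :: d :: t) (done.length : Int) "" = w := by
    intro w; simp [PySem.List.pyGetD_natCast, List.getD]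
  have hget1 : ∀ w : String,
      PySem.List.pyGetD (done ++ w :: d :: t) ((done.length : Int) + 1) "" = d := by
    intro w
    rw [show ((done.length : Int) + 1) = ((done.length + 1 : Nat) : Int) by omega,
        PySem.List.pyGetD_natCast, List.getD, List.getElem?_append_right (by omega)]
    simp
  have hset : ∀ (v w : String),
      PySem.List.pySetD (done ++ w :: d :: t) (done.length : Int) v = done ++ v :: d :: t := by
    intro v w
    simp [PySem.List.pySetD_natCast]
  dsimp only
  rw [hget, hget1]
  by_cases hc : c = "x"
  · by_cases hv : PySem.Str.isIn d "aeiou" = true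
    · rw [if_pos (And.intro hc hv), hset, hget, hget1]
      rw [if_neg (show ¬(("cks" : String) = "x" ∧
            ¬PySem.Str.isIn d "aeiou" = true) from fun h => absurd h.1 (by decide))]
      simp at hv; simp [vowS, hv, hc]
    · rw [if_neg (show ¬(c = "x" ∧ PySem.Str.isIn d "aeiou" = true) from fun h => hv h.2),
          hget, hget1]
      rw [if_pos (And.intro hc hv), hset]
      simp at hv; simp [vowS, hv, hc]
  · rw [if_neg (show ¬(c = "x" ∧ PySem.Str.isIn d "aeiou" = true) from fun h => hc h.1),
        hget, hget1]
    rw [if_neg (show ¬(c = "x" ∧ ¬PySem.Str.isIn d "aeiou" = true) from fun h => hc h.1)]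
    simp [hc]

lemma loopA : ∀ (rest done : List String),
    (PySem.List.pyRange (done.length : Int)
        ((done.length : Int) + (rest.length : Int) - 1) 1).foldl
      (fun (cs : List String) (i : Int) =>
        let cs := if PySem.List.pyGetD cs i "" = "x" ∧
                     PySem.Str.isIn (PySem.List.pyGetD cs (i + 1) "") "aeiou" = true
                  then PySem.List.pySetD cs i "cks" else cs
        let cs := if PySem.List.pyGetD cs i "" = "x" ∧
                     ¬ (PySem.Str.isIn (PySem.List.pyGetD cs (i + 1) "") "aeiou" = true)
                  then PySem.List.pySetD cs i "k" else cs
        cs)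
      (done ++ rest) = done ++ procAs rest := by
  intro rest
  induction rest with
  | nil =>
      intro done
      rw [PySem.List.pyRange_one_eq_nil (by simp)]
      simp [procAs]
  | cons c t ih =>
      intro done
      cases t with
      | nil =>
          rw [PySem.List.pyRange_one_eq_nil (by simp)]
          simp [procAs]
      | cons d t' =>
          rw [PySem.List.pyRange_one_cons (by simp; omega), List.foldl_cons,
              loop_step done c d t']
          have harith : (done.length : Int) + 1
              = ((done ++ [if c = "x" then (if vowS d then "cks" else "k") else c]).length : Int) := by
            simp
          have harith2 : (done.length : Int) + ((c :: d :: t').length : Int) - 1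
              = ((done ++ [if c = "x" then (if vowS d then "cks" else "k") else c]).length : Int)
                + ((d :: t').length : Int) - 1 := by
            simp; omega
          rw [show done ++ (if c = "x" then (if vowS d then "cks" else "k") else c) :: d :: t'
                = (done ++ [if c = "x" then (if vowS d then "cks" else "k") else c]) ++ d :: t' by
              simp,
            harith, harith2, ih]
          simp [procAs]

-- A's cell list (fix + loop) equals fA on the original characters
lemma procAs_fix : ∀ (c : Char) (cs : List Char),
    procAs ((((c :: cs).map (fun c => String.ofList [c])).dropLast)
        ++ [if String.ofList [(c :: cs).getLast (by simp)] = "x" then "k"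
            else String.ofList [(c :: cs).getLast (by simp)]])
      = fA (c :: cs) := by
  intro c cs
  induction cs generalizing c with
  | nil =>
      by_cases h : c = 'x'
      · simp [procAs, fA, h, show String.ofList ['x'] = "x" by rfl]
      · have hx' : ¬ String.ofList [c] = "x" := fun hx =>
          h (by simpa using congrArg String.toList hx)
        simp [procAs, fA, h, hx']
  | cons d t ih =>
      have hlast : (c :: d :: t).getLast (by simp) = (d :: t).getLast (by simp) :=
        List.getLast_cons _
      have hdrop : ((c :: d :: t).map (fun c => String.ofList [c])).dropLast
          = String.ofList [c] :: ((d :: t).map (fun c => String.ofList [c])).dropLast := by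
        simp [List.dropLast_cons_of_ne_nil]
      rw [hlast, hdrop, List.cons_append]
      have hx : (String.ofList [c] = "x") ↔ (c = 'x') := by
        constructor
        · intro hx; have := congrArg String.toList hx; simpa using this
        · intro hx; subst hx; rfl
      have hhead : ∀ (r : List String), r ≠ [] →
          procAs (String.ofList [c] :: r)
            = (if c = 'x' then (if vowS (r.headI) then "cks" else "k") else String.ofList [c])
              :: procAs r := by
        intro r hr
        cases r with
        | nil => exact absurd rfl hr
        | cons r0 rt =>
            by_cases hc : c = 'x'
            · simp [procAs, hc, List.headI]
            · simp [procAs, hx, hc]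
      rw [hhead _ (by
            cases t with
            | nil => simp
            | cons u tu => simp [List.dropLast_cons_of_ne_nil]),
          ih d]
      have hheadI : ((((d :: t).map (fun c => String.ofList [c])).dropLast)
          ++ [if String.ofList [(d :: t).getLast (by simp) ] = "x" then "k"
              else String.ofList [(d :: t).getLast (by simp)]]).headI
          = (if d = 'x' ∧ t = [] then "k" else String.ofList [d]) := by
        cases t with
        | nil =>
            by_cases hd : d = 'x'
            · simp [hd, List.headI]
            · have hdx : ¬ String.ofList [d] = "x" := fun hcontr =>
                hd (by simpa using congrArg String.toList hcontr)
              simp [List.headI, hdx, hd]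
        | cons u tu =>
            simp [List.dropLast_cons_of_ne_nil, List.headI]
      rw [hheadI]
      have hvow : vowS (if d = 'x' ∧ t = [] then "k" else String.ofList [d]) = vowC d := by
        by_cases hd : d = 'x' ∧ t = []
        · rw [if_pos hd]
          have : vowC d = false := by rw [hd.1]; decide
          rw [this]; decide
        · rw [if_neg hd, vow_single]
      rw [hvow]
      simp [fA]

lemma join_empty (parts : List (List Char)) :
    PySem.Chars.join [] parts = parts.flatten := by
  rw [PySem.Chars.join]
  induction parts with
  | nil => rfl
  | cons p ps ih => cases ps <;> simp_all [List.intercalate, List.intersperse]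

-- reduce port A on a string whose characters are c :: cs to fA
lemma portA_eq (s : String) (c : Char) (cs : List Char) (hcs : s.toList = c :: cs) :
    pronounce_xs s = PySem.Str.join "" (fA (c :: cs)) := by
  unfold pronounce_xs
  rw [hcs]
  dsimp only
  have hmap_ne : (c :: cs).map (fun c => String.ofList [c]) ≠ [] := by simp
  rw [PySem.List.pyGetD_neg_one _ _ hmap_ne, List.getLast_map]
  have hfix : (if String.ofList [(c :: cs).getLast (by simp)] = "x"
        then PySem.List.pySetD ((c :: cs).map (fun c => String.ofList [c])) (-1) "k"
        else (c :: cs).map (fun c => String.ofList [c]))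
      = (((c :: cs).map (fun c => String.ofList [c])).dropLast)
        ++ [if String.ofList [(c :: cs).getLast (by simp)] = "x" then "k"
            else String.ofList [(c :: cs).getLast (by simp)]] := by
    by_cases hx : String.ofList [(c :: cs).getLast (by simp)] = "x"
    · rw [if_pos hx, if_pos hx, set_last _ _ hmap_ne]
    · rw [if_neg hx, if_neg hx]
      conv_lhs => rw [← List.dropLast_append_getLast hmap_ne]
      rw [List.getLast_map]
  rw [hfix]
  have hform := loopA ((((c :: cs).map (fun c => String.ofList [c])).dropLast)
      ++ [if String.ofList [(c :: cs).getLast (by simp)] = "x" then "k"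
          else String.ofList [(c :: cs).getLast (by simp)]]) []
  simp only [List.length_nil, Nat.cast_zero, List.nil_append, zero_add] at hform
  rw [hform, procAs_fix]

-- ===== B-side lemmas =====

lemma headI_tail {a : Type} [Inhabited a] (l : List a) (h : l ≠ []) : l.headI :: l.tail = l := by
  cases l with
  | nil => exact absurd rfl h
  | cons x t => rfl

-- structural model of splitting on 'x'
def sp : List Char → List (List Char)
  | [] => [[]]
  | c :: t => if c = 'x' then [] :: sp t else (c :: (sp t).headI) :: (sp t).tail

lemma sp_x (t : List Char) : sp ('x' :: t) = [] :: sp t := by simp [sp]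

lemma sp_nx (c : Char) (t : List Char) (h : c ≠ 'x') :
    sp (c :: t) = (c :: (sp t).headI) :: (sp t).tail := by simp [sp, h]

lemma sp_ne_nil (l : List Char) : sp l ≠ [] := by
  cases l with
  | nil => simp [sp]
  | cons c t => by_cases h : c = 'x' <;> simp [sp, h]

-- PySem's fuel-based splitOn.go, specialised to the one-char separator 'x'
lemma go_x : ∀ (fuel : Nat) (l cur : List Char) (acc : List (List Char)), l.length < fuel →
    PySem.Chars.splitOn.go ['x'] fuel l cur acc
      = acc.reverse ++ (cur.reverse ++ (sp l).headI) :: (sp l).tail := by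
  intro fuel
  induction fuel with
  | zero => intro l cur acc h; omega
  | succ n ih =>
      intro l cur acc h
      cases l with
      | nil => simp [PySem.Chars.splitOn.go, sp]
      | cons c t =>
          by_cases hc : c = 'x'
          · subst hc
            rw [PySem.Chars.splitOn.go]
            rw [if_pos (by simp [List.isPrefixOf])]
            simp only [List.length_singleton, List.drop_succ_cons, List.drop_zero]
            rw [ih t [] _ (by simpa using h)]
            simp only [sp_x, List.headI_cons, List.tail_cons, List.reverse_cons,
              List.reverse_nil, List.nil_append, List.append_nil]
            rw [headI_tail (sp t) (sp_ne_nil t)]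
            simp
          · rw [PySem.Chars.splitOn.go]
            rw [if_neg (by simp [List.isPrefixOf]; intro h'; exact hc h'.symm)]
            rw [ih t (c :: cur) acc (by simpa using h)]
            simp [sp, hc]

lemma splitOn_eq_sp (l : List Char) : PySem.Chars.splitOn l ['x'] = sp l := by
  rw [PySem.Chars.splitOn, go_x (l.length + 1) l [] [] (by omega)]
  simp only [List.reverse_nil, List.nil_append]
  exact headI_tail (sp l) (sp_ne_nil l)

-- the separator token chosen from the head of the following segment
def tok (seg : List Char) : List Char :=
  if (match seg.head? with | some d => vowC d | none => false) then ['c', 'k', 's'] else ['k']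

-- B's result at the level of char lists
def g (l : List Char) : List Char :=
  (sp l).headI ++ (((sp l).tail).map (fun seg => tok seg ++ seg)).flatten

-- the heart: A's cells joined = B's split-and-rejoin
lemma key : ∀ (c : Char) (cs : List Char),
    ((fA (c :: cs)).map String.toList).flatten = g (c :: cs) := by
  intro c cs
  induction cs generalizing c with
  | nil =>
      by_cases h : c = 'x'
      · simp [fA, g, sp, tok, h]
      · simp [fA, g, sp, tok, h]
  | cons d t ih =>
      have hd_tok : tok ((sp (d :: t)).headI) = (if vowC d then ['c','k','s'] else ['k']) := by
        by_cases hd : d = 'x'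
        · have hx0 : vowC 'x' = false := by decide
          subst hd
          simp [sp_x, tok, hx0]
        · simp [sp_nx d t hd, tok]
      by_cases h : c = 'x'
      · have : g ('x' :: d :: t) = tok ((sp (d :: t)).headI) ++ g (d :: t) := by
          simp only [g, sp_x, List.headI_cons, List.tail_cons, List.nil_append]
          rw [← headI_tail (sp (d :: t)) (sp_ne_nil _), List.map_cons, List.flatten_cons]
          simp [List.append_assoc]
        rw [h, this, hd_tok, ← ih d]
        by_cases hv : vowC d = true
        · simp [fA, hv]
        · simp only [Bool.not_eq_true] at hv
          simp [fA, hv]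
      · have : g (c :: d :: t) = c :: g (d :: t) := by
          simp [g, sp_nx c (d :: t) h]
        rw [this, ← ih d]
        simp [fA, h]

-- generic fold lemma for B's string-building loop
lemma foldl_concat (segs : List String) (init : String) (f : String → String) :
    (segs.foldl (fun r seg => r ++ f seg ++ seg) init).toList
      = init.toList ++ (segs.map (fun seg => (f seg).toList ++ seg.toList)).flatten := by
  induction segs generalizing init with
  | nil => simp
  | cons seg t ih => simp [ih, List.append_assoc]

-- B's per-segment separator at the String level equals tok
lemma tokS_eq (seg : String) :
    ((if (["a", "e", "i", "o", "u"] : List String).contains (PySem.Str.slice seg none (some 1))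
      then "cks" else ("k" : String))).toList = tok seg.toList := by
  have hsl : (PySem.Str.slice seg none (some 1)).toList = seg.toList.take 1 := by
    simp [PySem.List.slice_to seg.toList (by omega : (0:Int) ≤ 1)]
  cases hl : seg.toList with
  | nil =>
      have : PySem.Str.slice seg none (some 1) = "" := by
        apply String.toList_inj.mp; rw [hsl, hl]; rfl
      simp [this, tok]
  | cons d t =>
      have hone : PySem.Str.slice seg none (some 1) = String.ofList [d] := by
        apply String.toList_inj.mp; rw [hsl, hl]; simp
      have hinj : ∀ v : Char, (String.ofList [d] = String.ofList [v]) = (d = v) := by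
        intro v; apply propext; constructor
        · intro hh; have := congrArg String.toList hh; simpa using this
        · intro hh; rw [hh]
      have hmv : (["a", "e", "i", "o", "u"] : List String).contains (String.ofList [d]) = vowC d := by
        simp only [List.contains_eq_mem, List.mem_cons, List.not_mem_nil, or_false,
          show ("a" : String) = String.ofList ['a'] from rfl,
          show ("e" : String) = String.ofList ['e'] from rfl,
          show ("i" : String) = String.ofList ['i'] from rfl,
          show ("o" : String) = String.ofList ['o'] from rfl,
          show ("u" : String) = String.ofList ['u'] from rfl,
          hinj, vowC]
      rw [hone, hmv]
      cases hv : vowC d <;> simp [tok, hv]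

-- reduce port B to g
lemma portB_eq (s : String) : (pronounce_xs_alt s).toList = g s.toList := by
  unfold pronounce_xs_alt
  dsimp only
  rw [show ("x" : String).toList = ['x'] from rfl, splitOn_eq_sp, PySem.List.slice_from_one]
  obtain ⟨p0, ps, hsp⟩ : ∃ p0 ps, sp s.toList = p0 :: ps := by
    cases h : sp s.toList with
    | nil => exact absurd h (sp_ne_nil _)
    | cons a b => exact ⟨a, b, rfl⟩
  rw [hsp]
  simp only [List.map_cons, List.tail_cons]
  rw [show PySem.List.pyGetD (String.ofList p0 :: ps.map String.ofList) 0 "" = String.ofList p0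
        from by simp [PySem.List.pyGetD, PySem.List.pyGet?, PySem.List.pyIdx?]]
  rw [foldl_concat]
  unfold g
  rw [hsp]
  simp only [List.headI_cons, List.tail_cons, List.map_map]
  refine congrArg₂ (· ++ ·) (by simp) (congrArg List.flatten (List.map_congr_left ?_))
  intro segl _
  simp only [Function.comp]
  rw [tokS_eq]
  simp

-- ===== VERDICT (by name: the statements are the Claim_ definitions above) =====
theorem pronounce_xs_spec : Claim_equal_pronounce_xs := by
  intro s _ hpre
  unfold Spec_pronounce_xs
  have h : s.toList ≠ [] := hpre
  obtain ⟨c, cs, hcs⟩ := List.exists_cons_of_ne_nil h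
  apply String.toList_inj.mp
  rw [portA_eq s c cs hcs, portB_eq, hcs, PySem.Str.toList_join,
      show ("" : String).toList = [] from rfl, join_empty]
  exact key c cs
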